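-- pv_equiv track=rewrite | github.com/Hein-k/DataSearch | find_links.py | get_acron
-- ===== SOURCE A (Python) =====
-- def get_acron(string, N):
--     # takes a string and provides with possible acronyms in the text
--     words = string.split()
--     acronym = ''.join(word[0].upper() for word in words)
--
--     substrings = []
--     for i in range(len(acronym) - N + 1):
--         substring = acronym[i:i+N]
--         if len(set(substring)) == N:
--             substrings.append(substring)
--
--     return substrings
-- ===== SOURCE B (Python) =====
-- def get_acron(string, N):
--     # one pass with a sliding run of distinct letters instead of building a set per window
--     acronym = ''.join(w[0].upper() for w in string.split())
--     if N <= 0: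
--         return []
--     res = []
--     run = []  # longest all-distinct run of acronym letters ending at the current position
--     for right, ch in enumerate(acronym):
--         if ch in run:
--             run = run[run.index(ch) + 1:]
--         run.append(ch)
--         if len(run) >= N:
--             res.append(acronym[right - N + 1:right + 1])
--     return res
-- ===== Notes on version B (the rewrite author's own statement) =====
-- stated objective: alternative
-- what changed: Instead of building a set for every length-N window of the acronym, B makes one pass over the acronym maintaining the longest duplicate-free run of letters ending at the current position and emits the window whenever that run reaches length N.
-- intended difference: For N == 0 A returns len(acronym)+1 copies of the empty string (every empty slice trivially passes the distinctness test), which is no acronym at all; B returns the intended []. — e.g. on get_acron("ab cd", 0): A returns ["", "", ""], B returns []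
import Mathlib
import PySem

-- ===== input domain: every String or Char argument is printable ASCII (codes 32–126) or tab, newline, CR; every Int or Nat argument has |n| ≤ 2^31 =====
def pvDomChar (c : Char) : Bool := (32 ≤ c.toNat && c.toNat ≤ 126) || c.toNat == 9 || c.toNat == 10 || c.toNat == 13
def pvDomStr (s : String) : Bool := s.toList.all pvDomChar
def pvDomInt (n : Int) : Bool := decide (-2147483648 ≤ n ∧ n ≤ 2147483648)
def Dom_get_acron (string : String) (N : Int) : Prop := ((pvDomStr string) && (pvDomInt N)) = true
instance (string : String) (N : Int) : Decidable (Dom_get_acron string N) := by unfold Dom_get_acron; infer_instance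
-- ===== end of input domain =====

-- B replaces A's set-per-window test by ONE pass keeping the longest duplicate-free run of
-- acronym letters (alternative algorithm); neither program mutates its arguments.

-- acronym = ''.join(word[0].upper() for word in string.split())  — the identical first line of A
-- and of B, shared as a helper by both ports.  word[0] raises only on an empty word, which
-- str.split() never yields, so the `.getD ""` default is unreachable.
def pvFirstUpper (w : String) : String :=
  ((PySem.Str.pyGet? w 0).map (fun c => PySem.Str.upper (String.ofList [c]))).getD ""

def pvAcronym (string : String) : String :=
  PySem.Str.join "" ((PySem.Str.split₀ string).map pvFirstUpper)

-- ===== PORT A =====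
def get_acron (string : String) (N : Int) : List String :=
  let acronym := pvAcronym string
  (PySem.List.pyRange 0 (PySem.Str.len acronym - N + 1)).foldl
    (fun subs i =>
      let substring := PySem.Str.slice acronym (some i) (some (i + N))
      if (((PySem.Set.ofList substring.toList).length : Int) == N) then subs ++ [substring]
      else subs)
    []

-- ===== PORT B =====
def get_acron_alt (string : String) (N : Int) : List String :=
  let acronym := pvAcronym string
  if N ≤ 0 then []
  else
    ((PySem.List.enumerate acronym.toList).foldl
      (fun (st : List Char × List String) p =>
        let run := if st.1.contains p.2 then
            PySem.List.slice st.1 (some ((((PySem.List.index? st.1 p.2).getD 0 : Nat) : Int) + 1)) none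
          else st.1
        let run := run ++ [p.2]
        let res := if N ≤ (run.length : Int) then
            st.2 ++ [PySem.Str.slice acronym (some (p.1 - N + 1)) (some (p.1 + 1))]
          else st.2
        (run, res))
      ([], [])).2

-- ===== PRECONDITION & SPEC =====
-- For N == 0 A returns len(acronym)+1 copies of the empty string (every empty slice passes the
-- distinctness test), which is no acronym at all; B returns the intended [] there.
def D_get_acron (string : String) (N : Int) : Prop := N = 0
instance (string : String) (N : Int) : Decidable (D_get_acron string N) := by unfold D_get_acron; infer_instance

def Spec_get_acron (string : String) (N : Int) (out : List String) : Prop :=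
  ¬ D_get_acron string N → out = get_acron_alt string N
instance (string : String) (N : Int) (out : List String) : Decidable (Spec_get_acron string N out) := by
  unfold Spec_get_acron; infer_instance

def pvDiffWitness_get_acron : String × Int := ("ab cd", 0)
def pvDiffWitnessOut_get_acron : (List String) × (List String) := (["", "", ""], [])

-- ===== CLAIM (what is proved, stated in full; the proofs are below) =====
def Claim_unchanged_get_acron : Prop := ∀ (string : String) (N : Int), Dom_get_acron string N → Spec_get_acron string N (get_acron string N)
def Claim_changed_get_acron : Prop := Dom_get_acron (pvDiffWitness_get_acron.1) (pvDiffWitness_get_acron.2) ∧ D_get_acron (pvDiffWitness_get_acron.1) (pvDiffWitness_get_acron.2) ∧ get_acron (pvDiffWitness_get_acron.1) (pvDiffWitness_get_acron.2) = pvDiffWitnessOut_get_acron.1 ∧ get_acron_alt (pvDiffWitness_get_acron.1) (pvDiffWitness_get_acron.2) = pvDiffWitnessOut_get_acron.2 ∧ pvDiffWitnessOut_get_acron.1 ≠ pvDiffWitnessOut_get_acron.2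
def Claim_exact_get_acron : Prop := ∀ (string : String) (N : Int), Dom_get_acron string N → D_get_acron string N → get_acron string N ≠ get_acron_alt string N

-- ===== LEMMAS AND PROOFS =====

-- B's run update, as a function of the current run and the incoming character
-- (exactly the run-updating lines of the port's loop body)
def pvStep (run : List Char) (c : Char) : List Char :=
  (if run.contains c then
      PySem.List.slice run (some ((((PySem.List.index? run c).getD 0 : Nat) : Int) + 1)) none
    else run) ++ [c]

-- the run after processing a prefix p of the acronym
def pvRun (p : List Char) : List Char := p.foldl pvStep []

lemma pvRun_nil : pvRun [] = [] := rfl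

lemma pvRun_append_singleton (p : List Char) (c : Char) :
    pvRun (p ++ [c]) = pvStep (pvRun p) c := by
  simp [pvRun, List.foldl_append]

lemma pvStep_eq_of_not_mem (run : List Char) (c : Char) (h : c ∉ run) :
    pvStep run c = run ++ [c] := by
  simp [pvStep, h]

lemma pvStep_eq_of_mem (run : List Char) (c : Char) (j : Nat) (h : run.idxOf? c = some j) :
    pvStep run c = run.drop (j + 1) ++ [c] := by
  have hc : c ∈ run := by
    rcases List.idxOf?_eq_some_iff.mp h with ⟨hj, hg, _⟩
    exact hg ▸ List.getElem_mem hj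
  rw [pvStep, if_pos (List.elem_eq_true_of_mem hc), PySem.List.index?_eq_idxOf?, h]
  rw [PySem.List.slice_from run (by positivity)]
  norm_num

-- the invariant of B's sweep: the run is a suffix of the processed prefix, it has no duplicate
-- letters, and it is maximal (the letter just before it occurs again inside it)
def pvInv (p run : List Char) : Prop :=
  run <:+ p ∧ run.Nodup ∧ (run = p ∨ ∃ q a, p = q ++ a :: run ∧ a ∈ run)

lemma pvInv_step (p run : List Char) (c : Char) (h : pvInv p run) :
    pvInv (p ++ [c]) (pvStep run c) := by
  obtain ⟨⟨q', hq'⟩, hnd, hmax⟩ := h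
  by_cases hc : c ∈ run
  · -- c repeats: the run restarts just past c's previous occurrence
    obtain ⟨j, hj⟩ : ∃ j, run.idxOf? c = some j := by
      cases hj : run.idxOf? c with
      | none => exact absurd (List.idxOf?_eq_none_iff.mp hj) (not_not_intro hc)
      | some j => exact ⟨j, rfl⟩
    rcases List.idxOf?_eq_some_iff.mp hj with ⟨hjlt, hgj, _⟩
    rw [pvStep_eq_of_mem run c j hj]
    have hdropj : run.drop j = c :: run.drop (j + 1) := by
      rw [← List.getElem_cons_drop hjlt, hgj]
    have hnotmem : c ∉ run.drop (j + 1) := by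
      have : (run.drop j).Nodup := hnd.sublist (List.drop_sublist j run)
      rw [hdropj] at this
      exact (List.nodup_cons.mp this).1
    refine ⟨?_, ?_, ?_⟩
    · refine ⟨q' ++ run.take (j+1), ?_⟩
      rw [List.append_assoc, ← List.append_assoc (run.take (j+1)), List.take_append_drop,
        ← List.append_assoc, hq']
    · have : (run.drop (j+1)).Nodup := hnd.sublist (List.drop_sublist (j+1) run)
      refine this.append (List.nodup_singleton c) ?_
      intro a ha hb
      rw [List.mem_singleton] at hb
      exact hnotmem (hb ▸ ha)
    · refine Or.inr ⟨q' ++ run.take j, c, ?_, by simp⟩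
      have hrun : run = run.take j ++ c :: run.drop (j + 1) := by
        rw [← hdropj, List.take_append_drop]
      rw [← hq']
      conv_lhs => rw [hrun]
      simp [List.append_assoc]
  · rw [pvStep_eq_of_not_mem run c hc]
    refine ⟨⟨q', by rw [← hq', List.append_assoc]⟩, hnd.append (List.nodup_singleton c)
      (by intro a ha hb; rw [List.mem_singleton] at hb; exact hc (hb ▸ ha)), ?_⟩
    rcases hmax with h1 | ⟨q, a, hp, ha⟩
    · exact Or.inl (by rw [h1])
    · exact Or.inr ⟨q, a, by rw [hp, List.append_assoc, List.cons_append], by simp [ha]⟩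

lemma pvInv_run (p : List Char) : pvInv p (pvRun p) := by
  induction p using List.reverseRecOn with
  | nil => exact ⟨List.nil_suffix, List.nodup_nil, Or.inl rfl⟩
  | append_singleton p c ih => rw [pvRun_append_singleton]; exact pvInv_step p (pvRun p) c ih

lemma pvRun_length_le (p : List Char) : (pvRun p).length ≤ p.length :=
  (pvInv_run p).1.sublist.length_le

-- the key fact: the last k letters of the processed prefix are pairwise distinct
-- exactly when the run has reached length k
lemma pvRun_key (p : List Char) (k : Nat) (hkp : k ≤ p.length) :
    (p.drop (p.length - k)).Nodup ↔ k ≤ (pvRun p).length := by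
  obtain ⟨⟨q, hq⟩, hnd, hmax⟩ := pvInv_run p
  constructor
  · intro h
    by_contra hlt
    push_neg at hlt
    have hne : pvRun p ≠ p := by
      intro he
      rw [he] at hlt
      omega
    rcases hmax with h1 | ⟨q2, a, hp2, ha⟩
    · exact hne h1
    · -- a :: pvRun p is a suffix of p of length ≤ k, hence a suffix of the last-k window
      have hsuf : a :: pvRun p <:+ p.drop (p.length - k) := by
        refine List.suffix_of_suffix_length_le ⟨q2, hp2.symm⟩ (List.drop_suffix _ p) ?_
        simp only [List.length_cons, List.length_drop]
        omega
      have : (a :: pvRun p).Nodup := hsuf.sublist.nodup h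
      exact (List.nodup_cons.mp this).1 ha
  · intro h
    have hdrop : p.drop (p.length - k) = (pvRun p).drop ((pvRun p).length - k) := by
      conv_lhs => rw [← hq]
      rw [List.length_append,
        show q.length + (pvRun p).length - k = q.length + ((pvRun p).length - k) from by omega,
        List.drop_length_add_append]
    rw [hdrop]
    exact hnd.sublist (List.drop_sublist _ _)

-- set(w) has as many elements as w exactly when w has no duplicates
lemma pvSet_ofList_sublist {α : Type} [BEq α] [LawfulBEq α] (xs : List α) :
    (PySem.Set.ofList xs).Sublist xs := by
  induction xs using List.reverseRecOn with
  | nil => simp [PySem.Set.ofList]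
  | append_singleton xs x ih =>
      rw [PySem.Set.ofList_append_singleton, PySem.Set.add_eq_ite]
      split
      · exact ih.trans (List.sublist_append_left xs [x])
      · exact ih.append (List.Sublist.refl [x])

lemma pvSet_len_iff {α : Type} [BEq α] [LawfulBEq α] (xs : List α) :
    (PySem.Set.ofList xs).length = xs.length ↔ xs.Nodup := by
  constructor
  · intro h
    have := (pvSet_ofList_sublist xs).eq_of_length h
    rw [← this]; exact PySem.Set.nodup_ofList xs
  · intro h; rw [PySem.Set.ofList_eq_self_of_nodup xs h]

-- B's loop, characterised: it emits exactly the windows whose end position r has a run of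
-- length ≥ N, in increasing order of r
lemma pvB_loop (acr : String) (N : Int) (full : List Char) (l : List Char) :
    ∀ (p : List Char) (res : List String), full = p ++ l →
    (PySem.List.enumerate l ((p.length : Nat) : Int)).foldl
      (fun (st : List Char × List String) q =>
        (pvStep st.1 q.2,
         if N ≤ ((pvStep st.1 q.2).length : Int) then
           st.2 ++ [PySem.Str.slice acr (some (q.1 - N + 1)) (some (q.1 + 1))]
         else st.2))
      (pvRun p, res)
    = (pvRun (p ++ l),
       res ++ ((List.range' p.length l.length).filter
           (fun r => decide (N ≤ ((pvRun (full.take (r + 1))).length : Int)))).map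
         (fun (r : Nat) => PySem.Str.slice acr (some ((r : Int) - N + 1)) (some ((r : Int) + 1)))) := by
  induction l with
  | nil => intro p res _; simp [PySem.List.enumerate]
  | cons c l ih =>
    intro p res hfull
    rw [PySem.List.enumerate_cons, List.foldl_cons]
    have hstep : pvStep (pvRun p) c = pvRun (p ++ [c]) := (pvRun_append_singleton p c).symm
    rw [hstep]
    have hcast : ((p.length : Nat) : Int) + 1 = (((p ++ [c]).length : Nat) : Int) := by
      simp
    rw [hcast]
    rw [ih (p ++ [c]) _ (by rw [hfull]; simp)]
    have hassoc : (p ++ [c]) ++ l = p ++ c :: l := by simp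
    have htake : full.take (p.length + 1) = p ++ [c] := by
      rw [hfull, List.take_append]
      simp
    rw [hassoc]
    simp only [List.length_cons, List.range'_succ]
    rw [List.filter_cons]
    simp only [htake]
    split
    · rename_i hcond
      rw [if_pos (by simpa using hcond)]
      simp [List.append_assoc]
    · rename_i hcond
      rw [if_neg (by simpa using hcond)]
      simp

-- B as a filter-map over window end positions
lemma pvB_char (s : String) (N : Int) (hpos : ¬ N ≤ 0) :
    get_acron_alt s N =
      ((List.range' 0 (pvAcronym s).toList.length).filter
          (fun r => decide (N ≤ ((pvRun ((pvAcronym s).toList.take (r + 1))).length : Int)))).map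
        (fun (r : Nat) => PySem.Str.slice (pvAcronym s) (some ((r : Int) - N + 1)) (some ((r : Int) + 1))) := by
  have h := pvB_loop (pvAcronym s) N (pvAcronym s).toList (pvAcronym s).toList [] [] (by simp)
  simp only [pvRun_nil, List.nil_append, List.length_nil] at h
  simp only [get_acron_alt]
  rw [if_neg hpos]
  show (List.foldl (fun (st : List Char × List String) q =>
      (pvStep st.1 q.2,
       if N ≤ ((pvStep st.1 q.2).length : Int) then
         st.2 ++ [PySem.Str.slice (pvAcronym s) (some (q.1 - N + 1)) (some (q.1 + 1))]
       else st.2)) ([], []) (PySem.List.enumerate (pvAcronym s).toList)).2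
    = ((List.range' 0 (pvAcronym s).toList.length).filter
          (fun r => decide (N ≤ ((pvRun ((pvAcronym s).toList.take (r + 1))).length : Int)))).map
        (fun (r : Nat) => PySem.Str.slice (pvAcronym s) (some ((r : Int) - N + 1)) (some ((r : Int) + 1)))
  rw [show (0 : Int) = ((0 : Nat) : Int) from by norm_num]
  rw [h]

-- A as a filter-map over window start positions
lemma pvA_char (s : String) (N : Int) :
    get_acron s N =
      ((PySem.List.pyRange 0 (((pvAcronym s).toList.length : Int) - N + 1)).filter
          (fun i => (((PySem.Set.ofList
              (PySem.Str.slice (pvAcronym s) (some i) (some (i + N))).toList).length : Int) == N))).map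
        (fun i => PySem.Str.slice (pvAcronym s) (some i) (some (i + N))) := by
  simp only [get_acron, PySem.Str.len_eq]
  rw [PySem.List.foldl_append_if
    (p := fun i => (((PySem.Set.ofList
        (PySem.Str.slice (pvAcronym s) (some i) (some (i + N))).toList).length : Int) == N))
    (f := fun i => PySem.Str.slice (pvAcronym s) (some i) (some (i + N)))]
  rw [List.nil_append]

-- the main equivalence: outside N = 0 the two programs agree
lemma pv_main (s : String) (N : Int) (hN : ¬ N = 0) : get_acron s N = get_acron_alt s N := by
  by_cases hpos : N ≤ 0
  · -- N < 0: A's distinctness test never fires, B returns [] at once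
    rw [pvA_char]
    rw [List.filter_eq_nil_iff.mpr ?_]
    · rw [List.map_nil]
      simp only [get_acron_alt]
      rw [if_pos hpos]
    · intro i _
      simp only [beq_iff_eq]
      intro hEq
      have : N < 0 := lt_of_le_of_ne hpos hN
      omega
  · push_neg at hpos
    obtain ⟨k, hkN, hk1⟩ : ∃ k : Nat, N = (k : Int) ∧ 1 ≤ k :=
      ⟨N.toNat, (Int.toNat_of_nonneg (le_of_lt hpos)).symm, by omega⟩
    rw [pvA_char, pvB_char s N (by omega)]
    rw [← List.range_eq_range']
    generalize pvAcronym s = acr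
    generalize hcs : acr.toList = cs
    have hwin : ∀ i : Nat, i + k ≤ cs.length →
        (PySem.Str.slice acr (some (i : Int)) (some ((i : Int) + N))).toList
          = (cs.drop i).take k := by
      intro i hi
      rw [PySem.Str.toList_slice, PySem.Chars.slice_eq_listSlice, hcs]
      rw [show (i : Int) + N = ((i + k : Nat) : Int) from by push_cast [hkN]; ring]
      rw [PySem.List.slice_natCast cs i (i + k)]
      congr 1
      omega
    have hcond : ∀ i : Nat, i + k ≤ cs.length →
        (((PySem.Set.ofList
            (PySem.Str.slice acr (some (i : Int)) (some ((i : Int) + N))).toList).length : Int) == N)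
          = decide (N ≤ ((pvRun (cs.take (i + k))).length : Int)) := by
      intro i hi
      rw [Bool.eq_iff_iff, beq_iff_eq, decide_eq_true_eq, hwin i hi]
      have hlenw : ((cs.drop i).take k).length = k := by
        simp only [List.length_take, List.length_drop]
        omega
      have hlen_take : (cs.take (i + k)).length = i + k := by
        simp only [List.length_take]
        omega
      have hkey := pvRun_key (cs.take (i + k)) k (by omega)
      rw [hlen_take] at hkey
      have hdt : (cs.take (i + k)).drop (i + k - k) = (cs.drop i).take k := by
        rw [show i + k - k = i from by omega, List.drop_take]
        congr 1
        omega
      rw [hdt] at hkey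
      constructor
      · intro hEq
        have hlen' : (PySem.Set.ofList ((cs.drop i).take k)).length = ((cs.drop i).take k).length := by
          rw [hlenw]; rw [hkN] at hEq; exact_mod_cast hEq
        have := hkey.mp ((pvSet_len_iff _).mp hlen')
        omega
      · intro hle
        have hnd := hkey.mpr (by omega)
        rw [(pvSet_len_iff _).mpr hnd, hlenw]
        omega
    by_cases hnk : cs.length < k
    · -- the acronym is shorter than N: both sides are empty
      have hA : PySem.List.pyRange 0 ((cs.length : Int) - N + 1) = [] := by
        rw [List.eq_nil_iff_forall_not_mem]
        intro x hx
        rw [PySem.List.mem_pyRange_one] at hx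
        omega
      rw [hA, List.filter_nil, List.map_nil]
      rw [List.filter_eq_nil_iff.mpr ?_, List.map_nil]
      intro r hr
      rw [List.mem_range] at hr
      simp only [decide_eq_true_eq, not_le]
      have h1 := pvRun_length_le (cs.take (r + 1))
      have h2 : (cs.take (r + 1)).length ≤ r + 1 := by
        simp [List.length_take]
      omega
    · push_neg at hnk
      rw [show (cs.length : Int) - N + 1 = ((cs.length + 1 - k : Nat) : Int) from by
        push_cast [hkN]; omega]
      rw [PySem.List.pyRange_zero_natCast, List.filter_map, List.map_map]
      have hsplit : List.range cs.length
          = List.range (k - 1) ++ (List.range (cs.length + 1 - k)).map (fun i => (k - 1) + i) := by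
        conv_lhs => rw [show cs.length = (k - 1) + (cs.length + 1 - k) from by omega]
        exact List.range_add
      rw [hsplit, List.filter_append]
      have hnil : (List.range (k - 1)).filter
          (fun r => decide (N ≤ ((pvRun (cs.take (r + 1))).length : Int))) = [] := by
        rw [List.filter_eq_nil_iff]
        intro r hr
        rw [List.mem_range] at hr
        simp only [decide_eq_true_eq, not_le]
        have h1 := pvRun_length_le (cs.take (r + 1))
        have h2 : (cs.take (r + 1)).length ≤ r + 1 := by
          simp [List.length_take]
        omega
      rw [hnil, List.nil_append, List.filter_map, List.map_map]
      rw [List.filter_congr (q := fun i =>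
        decide (N ≤ ((pvRun (cs.take ((fun i => (k - 1) + i) i + 1))).length : Int))) ?_]
      swap
      · intro i hi
        rw [List.mem_range] at hi
        have hik : i + k ≤ cs.length := by omega
        simp only [Function.comp_apply]
        rw [hcond i hik]
        rw [show (k - 1) + i + 1 = i + k from by omega]
      · apply List.map_congr_left
        intro i hi
        rw [List.mem_filter, List.mem_range] at hi
        have hilt : i < cs.length + 1 - k := hi.1
        simp only [Function.comp_apply]
        rw [show (((k - 1) + i : Nat) : Int) - N + 1 = (i : Int) from by push_cast [hkN]; omega]
        rw [show (((k - 1) + i : Nat) : Int) + 1 = (i : Int) + N from by push_cast [hkN]; omega]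

-- ===== VERDICT (by name: the statement is the Claim_ definition above) =====
theorem get_acron_spec : Claim_unchanged_get_acron := by
  intro s N _ hD
  exact pv_main s N hD

theorem get_acron_changed : Claim_changed_get_acron := by
  unfold Claim_changed_get_acron; decide

theorem get_acron_tight : Claim_exact_get_acron := by
  intro s N _ hD
  have hN0 : N = 0 := hD
  subst hN0
  have hB : get_acron_alt s 0 = [] := by
    simp only [get_acron_alt]
    rw [if_pos le_rfl]
  rw [hB, pvA_char]
  apply List.ne_nil_of_mem (a := PySem.Str.slice (pvAcronym s) (some 0) (some (0 + 0)))
  apply List.mem_map.mpr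
  refine ⟨0, List.mem_filter.mpr ⟨?_, ?_⟩, rfl⟩
  · rw [PySem.List.mem_pyRange_one]
    constructor
    · omega
    · have : (0 : Int) ≤ ((pvAcronym s).toList.length : Int) := by positivity
      omega
  · have h00 : (PySem.Str.slice (pvAcronym s) (some 0) (some (0 + 0))).toList = [] := by
      rw [PySem.Str.toList_slice, PySem.Chars.slice_eq_listSlice]
      have := PySem.List.slice_natCast (pvAcronym s).toList 0 0
      simpa using this
    rw [h00]
    decide
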